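-- pv_equiv track=rewrite | github.com/Stealeristaken/leetcodeSolutions | leetcodeInterviewQuestions/Question2409/Question2409.py | minGroups
-- ===== SOURCE A (Python) =====
-- from typing import List
--
-- def minGroups(intervals: List[List[int]]) -> int:
--     events= []
--     for interval in intervals:
--         events.append((interval[0],1))
--         events.append((interval[1]+1,-1))
--     events.sort(key=lambda x:(x[0],x[1]))
--     concurrent, max_concurrent = 0, 0
--     for event in events:
--         concurrent += event[1]
--         max_concurrent = max(max_concurrent,concurrent)
--     return max_concurrent
-- ===== SOURCE B (Python) =====
-- from typing import List
--
-- def minGroups(intervals: List[List[int]]) -> int: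
--     starts = sorted([iv[0] for iv in intervals])
--     ends = sorted([iv[1] + 1 for iv in intervals])
--     active = 0
--     best = 0
--     j = 0
--     for s in starts:
--         while j < len(ends) and ends[j] <= s:
--             active -= 1
--             j += 1
--         active += 1
--         best = max(best, active)
--     return best
-- ===== Notes on version B (the rewrite author's own statement) =====
-- stated objective: alternative
-- what changed: Replaces A's single sorted (coordinate, delta) event list and full running-sum/max pass by two separately sorted start and end+1 arrays swept with a two-pointer merge whose counter only updates the maximum at start events.
import Mathlib
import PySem

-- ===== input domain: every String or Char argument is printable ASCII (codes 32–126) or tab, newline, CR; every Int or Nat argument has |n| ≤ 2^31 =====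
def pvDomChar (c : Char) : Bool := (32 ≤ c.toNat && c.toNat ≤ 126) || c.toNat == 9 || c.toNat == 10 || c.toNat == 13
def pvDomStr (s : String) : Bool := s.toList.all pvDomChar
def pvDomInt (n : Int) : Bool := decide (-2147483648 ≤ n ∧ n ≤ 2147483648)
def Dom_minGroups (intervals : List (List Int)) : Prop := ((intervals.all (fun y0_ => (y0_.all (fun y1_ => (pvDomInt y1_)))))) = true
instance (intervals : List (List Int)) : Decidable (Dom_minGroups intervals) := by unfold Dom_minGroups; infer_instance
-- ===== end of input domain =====

-- B replaces A's single sorted event list by two separately sorted start/end arrays swept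
-- with a two-pointer merge (alternative decomposition of the same sweep; same O(n log n) cost).
-- Pre_ excludes inputs containing an interval with fewer than 2 elements, on which A raises IndexError.


-- ===== PORT A =====
-- events built by two appends per interval, sorted by the tuple key (x[0], x[1]), then a running-sum/max pass.
def minGroups (intervals : List (List Int)) : Int :=
  let events : List (Int × Int) := intervals.foldl
    (fun ev iv =>
      (ev ++ [(PySem.List.pyGetD iv 0 0, (1 : Int))]) ++ [(PySem.List.pyGetD iv 1 0 + 1, (-1 : Int))])
    []
  let sortedEvents := PySem.List.sorted2 events (fun x => x.1) (fun x => x.2)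
  let r := sortedEvents.foldl (fun (st : Int × Int) ev => (st.1 + ev.2, max st.2 (st.1 + ev.2))) (0, 0)
  r.2

-- ===== PORT B =====
-- the inner `while j < len(ends) and ends[j] <= s: active -= 1; j += 1` loop of Source B
def bDrain (es : List Int) (s : Int) (j : Nat) (active : Int) : Nat × Int :=
  if h : j < es.length then
    if es[j] ≤ s then bDrain es s (j + 1) (active - 1) else (j, active)
  else (j, active)
termination_by es.length - j

def minGroups_alt (intervals : List (List Int)) : Int :=
  let starts := PySem.List.sorted (intervals.map (fun iv => PySem.List.pyGetD iv 0 0)) (fun x => x)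
  let ends := PySem.List.sorted (intervals.map (fun iv => PySem.List.pyGetD iv 1 0 + 1)) (fun x => x)
  -- state: (active, best, j)
  let r := starts.foldl
    (fun (st : Int × Int × Nat) s =>
      let p := bDrain ends s st.2.2 st.1
      (p.2 + 1, max st.2.1 (p.2 + 1), p.1))
    (0, 0, 0)
  r.2.1

-- ===== PRECONDITION & SPEC =====
-- Pre_ excludes exactly the inputs where Python A raises IndexError: an interval list with fewer than 2 elements.
def Pre_minGroups (intervals : List (List Int)) : Prop := ∀ iv ∈ intervals, 2 ≤ iv.length
instance (intervals : List (List Int)) : Decidable (Pre_minGroups intervals) := by unfold Pre_minGroups; infer_instance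
def pvWitness_minGroups : List (List Int) := [[1, 3], [2, 5], [4, 4]]

def Spec_minGroups (intervals : List (List Int)) (out : Int) : Prop := out = minGroups_alt intervals
instance (intervals : List (List Int)) (out : Int) : Decidable (Spec_minGroups intervals out) := by unfold Spec_minGroups; infer_instance

-- ===== CLAIM (what is proved, stated in full; the proofs are below) =====
def Claim_equal_minGroups : Prop := ∀ (intervals : List (List Int)), Dom_minGroups intervals → Pre_minGroups intervals → Spec_minGroups intervals (minGroups intervals)

-- ===== LEMMAS AND PROOFS =====

-- strict lexicographic order on events, as sorted2's comparison
def evLt (a b : Int × Int) : Bool :=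
  decide (a.1 < b.1) || (!decide (b.1 < a.1) && decide (a.2 < b.2))

theorem evLt_eq_true_iff (a b : Int × Int) :
    evLt a b = true ↔ (a.1 < b.1 ∨ (a.1 = b.1 ∧ a.2 < b.2)) := by
  simp only [evLt, Bool.or_eq_true, Bool.and_eq_true, Bool.not_eq_true', decide_eq_true_eq,
    decide_eq_false_iff_not]
  omega

theorem evLt_eq_false_iff (a b : Int × Int) :
    evLt a b = false ↔ (b.1 < a.1 ∨ (b.1 = a.1 ∧ b.2 ≤ a.2)) := by
  simp only [evLt, Bool.or_eq_false_iff, Bool.and_eq_false_iff, Bool.not_eq_false',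
    decide_eq_false_iff_not, decide_eq_true_eq]
  omega

-- merge of sorted starts (+1 events) and sorted shifted ends (-1 events), ends first at equal coordinates
def mergeE : List Int → List Int → List (Int × Int)
  | [], es => es.map (fun e => (e, -1))
  | s :: ss, [] => (s, 1) :: mergeE ss []
  | s :: ss, e :: es =>
      if e ≤ s then (e, -1) :: mergeE (s :: ss) es
      else (s, 1) :: mergeE ss (e :: es)
termination_by ss es => ss.length + es.length

-- B's sweep, written structurally over the two sorted lists
def foldB : List Int → List Int → Int → Int → Int
  | [], _, _, b => b
  | _ :: ss, [], a, b => foldB ss [] (a + 1) (max b (a + 1))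
  | s :: ss, e :: es, a, b =>
      if e ≤ s then foldB (s :: ss) es (a - 1) b
      else foldB ss (e :: es) (a + 1) (max b (a + 1))
termination_by ss es => ss.length + es.length

def stepA (st : Int × Int) (ev : Int × Int) : Int × Int := (st.1 + ev.2, max st.2 (st.1 + ev.2))

theorem foldB_nil (es : List Int) (a b : Int) : foldB [] es a b = b := by
  rw [foldB.eq_def]

theorem foldB_cons_nil (s : Int) (ss : List Int) (a b : Int) :
    foldB (s :: ss) [] a b = foldB ss [] (a + 1) (max b (a + 1)) := by
  rw [foldB.eq_def]

theorem foldB_cons_cons_le {s e : Int} (ss es : List Int) (h : e ≤ s) (a b : Int) :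
    foldB (s :: ss) (e :: es) a b = foldB (s :: ss) es (a - 1) b := by
  rw [foldB.eq_def]; simp [h]

theorem foldB_cons_cons_gt {s e : Int} (ss es : List Int) (h : ¬ e ≤ s) (a b : Int) :
    foldB (s :: ss) (e :: es) a b = foldB ss (e :: es) (a + 1) (max b (a + 1)) := by
  rw [foldB.eq_def]; simp [h]

theorem insertBy_evLt_pairwise (x : Int × Int) (ys : List (Int × Int))
    (h : ys.Pairwise (fun a b => evLt b a = false)) :
    (PySem.List.insertBy evLt x ys).Pairwise (fun a b => evLt b a = false) := by
  induction ys with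
  | nil => simp [PySem.List.insertBy]
  | cons y ys ih =>
    rw [List.pairwise_cons] at h
    by_cases hxy : evLt x y = true
    · rw [PySem.List.insertBy, if_pos hxy]
      refine List.pairwise_cons.2 ⟨?_, List.pairwise_cons.2 h⟩
      intro z hz
      rcases List.mem_cons.1 hz with hz | hz
      · subst hz
        rw [evLt_eq_true_iff] at hxy
        rw [evLt_eq_false_iff]
        omega
      · have hyz := h.1 z hz
        rw [evLt_eq_true_iff] at hxy
        rw [evLt_eq_false_iff] at hyz ⊢
        omega
    · rw [PySem.List.insertBy, if_neg hxy]
      refine List.pairwise_cons.2 ⟨?_, ih h.2⟩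
      intro z hz
      have hz' : z = x ∨ z ∈ ys :=
        (PySem.List.mem_insertBy (before := evLt) (x := x) (ys := ys) (y := z)).1 hz
      rcases hz' with hz' | hz'
      · subst hz'; simpa using hxy
      · exact h.1 z hz'

theorem foldl_insertBy_pairwise (xs : List (Int × Int)) :
    (xs.foldl (fun acc x => PySem.List.insertBy evLt x acc) []).Pairwise
      (fun a b => evLt b a = false) := by
  suffices h : ∀ acc : List (Int × Int), acc.Pairwise (fun a b => evLt b a = false) →
      (xs.foldl (fun acc x => PySem.List.insertBy evLt x acc) acc).Pairwise
        (fun a b => evLt b a = false) by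
    exact h [] (by simp)
  induction xs with
  | nil => intro acc h; simpa using h
  | cons x xs ih =>
    intro acc h
    exact ih _ (insertBy_evLt_pairwise x acc h)

theorem sorted2_eq_foldl (xs : List (Int × Int)) :
    PySem.List.sorted2 xs (fun x => x.1) (fun x => x.2) =
      xs.foldl (fun acc x => PySem.List.insertBy evLt x acc) [] := rfl

theorem mergeE_perm (ss es : List Int) :
    (mergeE ss es).Perm (ss.map (fun s => (s, 1)) ++ es.map (fun e => (e, -1))) := by
  fun_induction mergeE ss es with
  | case1 es => simp
  | case2 s ss ih =>
    simpa using ih.cons (s, 1)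
  | case3 s ss e es hle ih =>
    refine (ih.cons (e, -1)).trans ?_
    simpa using (List.perm_middle (a := (e, -1))
      (l₁ := (s, 1) :: ss.map (fun s => (s, 1))) (l₂ := es.map (fun e => (e, -1)))).symm
  | case4 s ss e es hle ih =>
    simpa using ih.cons (s, 1)

theorem mem_mergeE {z : Int × Int} {ss es : List Int} (h : z ∈ mergeE ss es) :
    (∃ s ∈ ss, z = (s, 1)) ∨ (∃ e ∈ es, z = (e, -1)) := by
  have := (mergeE_perm ss es).mem_iff.1 h
  simp only [List.mem_append, List.mem_map] at this
  rcases this with ⟨s, hs, hz⟩ | ⟨e, he, hz⟩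
  · exact Or.inl ⟨s, hs, hz.symm⟩
  · exact Or.inr ⟨e, he, hz.symm⟩

theorem mergeE_pairwise (ss es : List Int)
    (hss : ss.Pairwise (· ≤ ·)) (hes : es.Pairwise (· ≤ ·)) :
    (mergeE ss es).Pairwise (fun a b => evLt b a = false) := by
  fun_induction mergeE ss es with
  | case1 es =>
    refine List.Pairwise.map _ ?_ hes
    intro a b hab
    rw [evLt_eq_false_iff]
    simp only
    omega
  | case2 s ss ih =>
    refine List.pairwise_cons.2 ⟨?_, ih (List.pairwise_cons.1 hss).2 hes⟩
    intro z hz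
    rcases mem_mergeE hz with ⟨s', hs', hz⟩ | ⟨e', he', hz⟩
    · subst hz
      have := (List.pairwise_cons.1 hss).1 s' hs'
      rw [evLt_eq_false_iff]
      simp only
      omega
    · simp at he'
  | case3 s ss e es hle ih =>
    refine List.pairwise_cons.2 ⟨?_, ih hss (List.pairwise_cons.1 hes).2⟩
    intro z hz
    rcases mem_mergeE hz with ⟨s', hs', hz⟩ | ⟨e', he', hz⟩
    · subst hz
      have hs'' : s ≤ s' := by
        rcases List.mem_cons.1 hs' with h | h
        · omega
        · exact (List.pairwise_cons.1 hss).1 s' h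
      rw [evLt_eq_false_iff]
      simp only
      omega
    · subst hz
      have := (List.pairwise_cons.1 hes).1 e' he'
      rw [evLt_eq_false_iff]
      simp only
      omega
  | case4 s ss e es hle ih =>
    refine List.pairwise_cons.2 ⟨?_, ih (List.pairwise_cons.1 hss).2 hes⟩
    intro z hz
    rcases mem_mergeE hz with ⟨s', hs', hz⟩ | ⟨e', he', hz⟩
    · subst hz
      have := (List.pairwise_cons.1 hss).1 s' hs'
      rw [evLt_eq_false_iff]
      simp only
      omega
    · subst hz
      have he'' : e ≤ e' := by
        rcases List.mem_cons.1 he' with h | h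
        · omega
        · exact (List.pairwise_cons.1 hes).1 e' h
      rw [evLt_eq_false_iff]
      simp only
      omega

theorem eq_of_perm_of_pairwise_evLt {l₁ l₂ : List (Int × Int)}
    (hp : l₁.Perm l₂)
    (h₁ : l₁.Pairwise (fun a b => evLt b a = false))
    (h₂ : l₂.Pairwise (fun a b => evLt b a = false)) : l₁ = l₂ := by
  refine hp.eq_of_pairwise ?_ h₁ h₂
  intro a b _ _ hab hba
  rw [evLt_eq_false_iff] at hab hba
  exact Prod.ext (by omega) (by omega)

-- A's event-building loop is a flatMap
theorem events_eq_flatMap (intervals : List (List Int)) :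
    intervals.foldl
      (fun ev iv =>
        (ev ++ [(PySem.List.pyGetD iv 0 0, (1 : Int))]) ++ [(PySem.List.pyGetD iv 1 0 + 1, (-1 : Int))])
      [] =
    intervals.flatMap
      (fun iv => [(PySem.List.pyGetD iv 0 0, (1 : Int)), (PySem.List.pyGetD iv 1 0 + 1, (-1 : Int))]) := by
  have h : (fun (ev : List (Int × Int)) (iv : List Int) =>
        (ev ++ [(PySem.List.pyGetD iv 0 0, (1 : Int))]) ++ [(PySem.List.pyGetD iv 1 0 + 1, (-1 : Int))]) =
      fun ev iv => ev ++ [(PySem.List.pyGetD iv 0 0, (1 : Int)), (PySem.List.pyGetD iv 1 0 + 1, (-1 : Int))] := by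
    funext ev iv; simp
  rw [h, PySem.List.foldl_append_eq_flatMap]
  simp

theorem flatMap_perm_split (intervals : List (List Int)) :
    (intervals.flatMap
      (fun iv => [(PySem.List.pyGetD iv 0 0, (1 : Int)), (PySem.List.pyGetD iv 1 0 + 1, (-1 : Int))])).Perm
    ((intervals.map (fun iv => PySem.List.pyGetD iv 0 0)).map (fun s => (s, 1)) ++
      (intervals.map (fun iv => PySem.List.pyGetD iv 1 0 + 1)).map (fun e => (e, -1))) := by
  induction intervals with
  | nil => simp
  | cons iv rest ih =>
    simp only [List.flatMap_cons, List.map_cons, List.cons_append]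
    refine List.Perm.cons _ ?_
    refine List.Perm.trans (ih.cons _) ?_
    exact List.perm_middle.symm

-- the sorted event list IS the two-pointer merge of the two sorted coordinate lists
theorem sortedEvents_eq_mergeE (intervals : List (List Int)) :
    PySem.List.sorted2
      (intervals.foldl
        (fun ev iv =>
          (ev ++ [(PySem.List.pyGetD iv 0 0, (1 : Int))]) ++ [(PySem.List.pyGetD iv 1 0 + 1, (-1 : Int))])
        [])
      (fun x => x.1) (fun x => x.2) =
    mergeE (PySem.List.sorted (intervals.map (fun iv => PySem.List.pyGetD iv 0 0)) (fun x => x))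
      (PySem.List.sorted (intervals.map (fun iv => PySem.List.pyGetD iv 1 0 + 1)) (fun x => x)) := by
  set ss := PySem.List.sorted (intervals.map (fun iv => PySem.List.pyGetD iv 0 0)) (fun x => x) with hss
  set es := PySem.List.sorted (intervals.map (fun iv => PySem.List.pyGetD iv 1 0 + 1)) (fun x => x) with hes
  set events := intervals.foldl
      (fun ev iv =>
        (ev ++ [(PySem.List.pyGetD iv 0 0, (1 : Int))]) ++ [(PySem.List.pyGetD iv 1 0 + 1, (-1 : Int))])
      [] with hev
  refine eq_of_perm_of_pairwise_evLt ?_ ?_ ?_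
  · have h1 : events.Perm
        ((intervals.map (fun iv => PySem.List.pyGetD iv 0 0)).map (fun s => (s, 1)) ++
          (intervals.map (fun iv => PySem.List.pyGetD iv 1 0 + 1)).map (fun e => (e, -1))) := by
      rw [hev, events_eq_flatMap]
      exact flatMap_perm_split intervals
    have h3 : (ss.map (fun s => (s, 1)) ++ es.map (fun e => (e, -1))).Perm
        ((intervals.map (fun iv => PySem.List.pyGetD iv 0 0)).map (fun s => (s, 1)) ++
          (intervals.map (fun iv => PySem.List.pyGetD iv 1 0 + 1)).map (fun e => (e, -1))) :=
      List.Perm.append ((PySem.List.sorted_perm _ _ _).map _) ((PySem.List.sorted_perm _ _ _).map _)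
    exact (PySem.List.sorted2_perm events (fun x => x.1) (fun x => x.2) false).trans
      (h1.trans (h3.symm.trans (mergeE_perm ss es).symm))
  · rw [sorted2_eq_foldl]; exact foldl_insertBy_pairwise events
  · exact mergeE_pairwise ss es
      (by simpa using PySem.List.sorted_pairwise (intervals.map (fun iv => PySem.List.pyGetD iv 0 0)) (fun x => x))
      (by simpa using PySem.List.sorted_pairwise (intervals.map (fun iv => PySem.List.pyGetD iv 1 0 + 1)) (fun x => x))

-- trailing -1 events never change the running maximum
theorem foldA_ends (es : List Int) :
    ∀ c m : Int, c ≤ m → ((es.map (fun e => (e, -1))).foldl stepA (c, m)).2 = m := by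
  induction es with
  | nil => intro c m _; simp
  | cons e es ih =>
    intro c m h
    simp only [List.map_cons, List.foldl_cons, stepA]
    have hmax : max m (c + -1) = m := by omega
    rw [hmax]
    exact ih (c + -1) m (by omega)

-- A's running-sum/max pass over the merged events equals B's structural sweep
theorem foldA_mergeE (ss es : List Int) :
    ∀ c m : Int, c ≤ m → ((mergeE ss es).foldl stepA (c, m)).2 = foldB ss es c m := by
  fun_induction mergeE ss es with
  | case1 es =>
    intro c m h
    rw [foldB_nil]
    exact foldA_ends es c m h
  | case2 s ss ih =>
    intro c m h
    rw [foldB_cons_nil]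
    simp only [List.foldl_cons, stepA]
    exact ih (c + 1) (max m (c + 1)) (by omega)
  | case3 s ss e es hle ih =>
    intro c m h
    rw [foldB_cons_cons_le ss es hle]
    simp only [List.foldl_cons, stepA]
    have hmax : max m (c + -1) = m := by omega
    rw [hmax]
    have := ih (c - 1) m (by omega)
    simpa [sub_eq_add_neg] using this
  | case4 s ss e es hle ih =>
    intro c m h
    rw [foldB_cons_cons_gt ss es hle]
    simp only [List.foldl_cons, stepA]
    exact ih (c + 1) (max m (c + 1)) (by omega)

theorem bDrain_fst_le (es : List Int) (s : Int) :
    ∀ j : Nat, ∀ a : Int, j ≤ es.length → (bDrain es s j a).1 ≤ es.length := by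
  intro j
  induction hn : es.length - j using Nat.strong_induction_on generalizing j with
  | _ n ihn =>
    intro a hj
    by_cases hlt : j < es.length
    · by_cases hle : es[j] ≤ s
      · rw [bDrain, dif_pos hlt, if_pos hle]
        exact ihn (es.length - (j + 1)) (by omega) (j + 1) rfl (a - 1) (by omega)
      · rw [bDrain, dif_pos hlt, if_neg hle]
        exact hj
    · rw [bDrain, dif_neg hlt]
      exact hj

-- unfolding foldB at a start against the indexed while loop of the port
theorem foldB_cons_drain (es : List Int) (s : Int) (ss : List Int) :
    ∀ j : Nat, ∀ a b : Int, j ≤ es.length →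
      foldB (s :: ss) (es.drop j) a b =
        foldB ss (es.drop (bDrain es s j a).1) ((bDrain es s j a).2 + 1)
          (max b ((bDrain es s j a).2 + 1)) := by
  intro j
  induction hn : es.length - j using Nat.strong_induction_on generalizing j with
  | _ n ihn =>
    intro a b hj
    by_cases hlt : j < es.length
    · have hdrop : es[j] :: es.drop (j + 1) = es.drop j := List.getElem_cons_drop hlt
      by_cases hle : es[j] ≤ s
      · rw [bDrain, dif_pos hlt, if_pos hle]
        rw [← hdrop, foldB_cons_cons_le (ss := ss) (es := es.drop (j + 1)) hle]
        exact ihn (es.length - (j + 1)) (by omega) (j + 1) rfl (a - 1) b (by omega)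
      · rw [bDrain, dif_pos hlt, if_neg hle]
        rw [← hdrop, foldB_cons_cons_gt (ss := ss) (es := es.drop (j + 1)) hle, hdrop]
    · have hj' : j = es.length := by omega
      rw [bDrain, dif_neg hlt]
      subst hj'
      rw [List.drop_length, foldB_cons_nil]

-- B's indexed outer loop equals the structural sweep
theorem bOuter_eq_foldB (es ss : List Int) :
    ∀ j : Nat, ∀ a b : Int, j ≤ es.length →
      (ss.foldl
        (fun (st : Int × Int × Nat) s =>
          let p := bDrain es s st.2.2 st.1
          (p.2 + 1, max st.2.1 (p.2 + 1), p.1))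
        (a, b, j)).2.1 = foldB ss (es.drop j) a b := by
  induction ss with
  | nil => intro j a b _; simp [foldB_nil]
  | cons s ss ih =>
    intro j a b hj
    rw [foldB_cons_drain es s ss j a b hj]
    simp only [List.foldl_cons]
    exact ih (bDrain es s j a).1 ((bDrain es s j a).2 + 1) (max b ((bDrain es s j a).2 + 1))
      (bDrain_fst_le es s j a hj)

-- ===== VERDICT (by name: the statement is the Claim_ definition above) =====
theorem minGroups_spec : Claim_equal_minGroups := by
  intro intervals _ _
  show minGroups intervals = minGroups_alt intervals
  have h1 : minGroups intervals =
      ((mergeE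
          (PySem.List.sorted (intervals.map (fun iv => PySem.List.pyGetD iv 0 0)) (fun x => x))
          (PySem.List.sorted (intervals.map (fun iv => PySem.List.pyGetD iv 1 0 + 1)) (fun x => x))).foldl
        stepA (0, 0)).2 := by
    show ((PySem.List.sorted2
        (intervals.foldl
          (fun ev iv =>
            (ev ++ [(PySem.List.pyGetD iv 0 0, (1 : Int))]) ++ [(PySem.List.pyGetD iv 1 0 + 1, (-1 : Int))])
          [])
        (fun x => x.1) (fun x => x.2)).foldl stepA ((0 : Int), (0 : Int))).2 = _
    rw [sortedEvents_eq_mergeE intervals]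
  have h2 : minGroups_alt intervals =
      foldB (PySem.List.sorted (intervals.map (fun iv => PySem.List.pyGetD iv 0 0)) (fun x => x))
        ((PySem.List.sorted (intervals.map (fun iv => PySem.List.pyGetD iv 1 0 + 1)) (fun x => x)).drop 0)
        0 0 :=
    bOuter_eq_foldB
      (PySem.List.sorted (intervals.map (fun iv => PySem.List.pyGetD iv 1 0 + 1)) (fun x => x))
      (PySem.List.sorted (intervals.map (fun iv => PySem.List.pyGetD iv 0 0)) (fun x => x))
      0 0 0 (Nat.zero_le _)
  rw [h1, h2]
  exact foldA_mergeE _ _ 0 0 le_rfl
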